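-- pv_equiv track=rewrite | github.com/DankDaPancake/WordLadder | game_logic.py | get_color_hints
-- ===== SOURCE A (Python) =====
-- from collections import Counter
--
-- def get_color_hints(guess_word, target_word):
--     results = ["grey"] * len(target_word)
--     target_counts = Counter(target_word)
--
--     for i in range(len(guess_word)):
--         if guess_word[i] == target_word[i]:
--             results[i] = "green"
--             target_counts[guess_word[i]] -= 1
--
--     for i in range(len(guess_word)):
--         if results[i] == "green":
--             continue
--         if guess_word[i] in target_counts and target_counts[guess_word[i]] > 0:
--             results[i] = "yellow"
--             target_counts[guess_word[i]] -= 1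
--
--     return results
-- ===== SOURCE B (Python) =====
-- def get_color_hints(guess_word, target_word):
--     n, m = len(target_word), len(guess_word)
--     green = [i < m and guess_word[i] == target_word[i] for i in range(n)]
--
--     def avail(c):
--         # target occurrences of c not used up by a green match
--         return sum(1 for j in range(n) if not green[j] and target_word[j] == c)
--
--     hints = []
--     for i in range(n):
--         if green[i]:
--             hints.append("green")
--         elif i < m and sum(1 for k in range(i)
--                            if not green[k] and guess_word[k] == guess_word[i]) < avail(guess_word[i]):
--             hints.append("yellow")
--         else:
--             hints.append("grey")
--     return hints
-- ===== Notes on version B (the rewrite author's own statement) =====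
-- stated objective: alternative
-- what changed: B is counter-free and stateless: instead of A's mutable Counter decremented across two index loops over a prefilled result list, B decides each position independently by a counting rule - a non-green guess letter is yellow iff its occurrence rank among earlier non-green guess positions is below the number of non-green target occurrences of that letter.
import Mathlib
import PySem

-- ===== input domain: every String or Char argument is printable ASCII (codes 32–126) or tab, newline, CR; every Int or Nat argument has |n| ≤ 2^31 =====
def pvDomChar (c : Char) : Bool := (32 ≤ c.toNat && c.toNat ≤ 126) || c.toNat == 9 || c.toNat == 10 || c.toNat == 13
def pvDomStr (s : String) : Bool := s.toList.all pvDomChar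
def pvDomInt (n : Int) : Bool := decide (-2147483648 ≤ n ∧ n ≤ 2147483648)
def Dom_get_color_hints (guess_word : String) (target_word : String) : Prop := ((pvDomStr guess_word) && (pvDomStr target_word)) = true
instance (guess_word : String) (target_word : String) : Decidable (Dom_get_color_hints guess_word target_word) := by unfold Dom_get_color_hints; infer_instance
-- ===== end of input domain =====

-- B is counter-free: each position is decided independently by a stateless counting rule
-- (occurrence rank among non-green guess letters vs number of non-green target occurrences),
-- instead of A's mutable Counter decremented across two index loops (objective: alternative).

-- ===== PORT A =====
-- loop body of A's first pass (green marking, decrement the counter)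
def stepA1 (gs ts : List Char) (st : List String × PySem.Dict Char Int) (i : Int) :
    List String × PySem.Dict Char Int :=
  let gc := PySem.List.pyGetD gs i ' '
  let tc := PySem.List.pyGetD ts i ' '
  if gc = tc then (st.1.set i.toNat "green", st.2.modify gc 0 (· - 1)) else st

-- loop body of A's second pass (yellow marking)
def stepA2 (gs : List Char) (st : List String × PySem.Dict Char Int) (i : Int) :
    List String × PySem.Dict Char Int :=
  if PySem.List.pyGetD st.1 i "" = "green" then st
  else
    let gc := PySem.List.pyGetD gs i ' '
    if st.2.contains gc = true ∧ 0 < st.2.getD gc 0 then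
      (st.1.set i.toNat "yellow", st.2.modify gc 0 (· - 1))
    else st

def get_color_hints (guess_word : String) (target_word : String) : List String :=
  let gs := guess_word.toList
  let ts := target_word.toList
  let init : List String × PySem.Dict Char Int :=
    (List.replicate ts.length "grey", PySem.Dict.counter ts)
  let s1 := (PySem.List.pyRange 0 (gs.length : Int) 1).foldl (stepA1 gs ts) init
  let s2 := (PySem.List.pyRange 0 (gs.length : Int) 1).foldl (stepA2 gs) s1
  s2.1

-- ===== PORT B =====
-- green = [i < m and guess_word[i] == target_word[i] for i in range(n)]
def greenB (gs ts : List Char) : List Bool :=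
  (PySem.List.pyRange 0 (ts.length : Int) 1).map
    (fun i => decide (i < (gs.length : Int)) &&
      (PySem.List.pyGetD gs i ' ' == PySem.List.pyGetD ts i ' '))

-- avail(c) = sum(1 for j in range(n) if not green[j] and target_word[j] == c)
def availB (ts : List Char) (green : List Bool) (c : Char) : Int :=
  ((PySem.List.pyRange 0 (ts.length : Int) 1).map
    (fun j => if (!PySem.List.pyGetD green j false &&
        (PySem.List.pyGetD ts j ' ' == c)) = true then (1 : Int) else 0)).sum

-- rank = sum(1 for k in range(i) if not green[k] and guess_word[k] == c)
def rankB (gs : List Char) (green : List Bool) (i : Int) (c : Char) : Int :=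
  ((PySem.List.pyRange 0 i 1).map
    (fun k => if (!PySem.List.pyGetD green k false &&
        (PySem.List.pyGetD gs k ' ' == c)) = true then (1 : Int) else 0)).sum

-- body of B's loop over range(n), appending one hint per position
def stepB (gs ts : List Char) (green : List Bool) (acc : List String) (i : Int) : List String :=
  if PySem.List.pyGetD green i false = true then acc ++ ["green"]
  else if decide (i < (gs.length : Int)) &&
      decide (rankB gs green i (PySem.List.pyGetD gs i ' ') <
        availB ts green (PySem.List.pyGetD gs i ' ')) then acc ++ ["yellow"]
  else acc ++ ["grey"]

def get_color_hints_alt (guess_word : String) (target_word : String) : List String :=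
  let gs := guess_word.toList
  let ts := target_word.toList
  let green := greenB gs ts
  (PySem.List.pyRange 0 (ts.length : Int) 1).foldl (stepB gs ts green) []

-- ===== PRECONDITION & SPEC =====
-- Pre_ excludes len(guess_word) > len(target_word), exactly where A raises IndexError
-- (target_word[i] in the first loop).
def Pre_get_color_hints (guess_word : String) (target_word : String) : Prop :=
  guess_word.toList.length ≤ target_word.toList.length
instance (guess_word : String) (target_word : String) : Decidable (Pre_get_color_hints guess_word target_word) := by unfold Pre_get_color_hints; infer_instance

def pvWitness_get_color_hints : String × String := ("lead", "dealt")

def Spec_get_color_hints (guess_word : String) (target_word : String) (out : List String) : Prop := out = get_color_hints_alt guess_word target_word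
instance (guess_word : String) (target_word : String) (out : List String) : Decidable (Spec_get_color_hints guess_word target_word out) := by unfold Spec_get_color_hints; infer_instance

-- ===== CLAIM (what is proved, stated in full; the proofs are below) =====
def Claim_equal_get_color_hints : Prop := ∀ (guess_word : String) (target_word : String), Dom_get_color_hints guess_word target_word → Pre_get_color_hints guess_word target_word → Spec_get_color_hints guess_word target_word (get_color_hints guess_word target_word)

-- ===== LEMMAS AND PROOFS =====

-- "position j is green" as a Bool over Nat indices (guard included)
def gbx (gs ts : List Char) (j : Nat) : Bool :=
  decide (j < gs.length) && (gs.getD j ' ' == ts.getD j ' ')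

-- number of non-green target occurrences of c
def cntA (gs ts : List Char) (c : Char) : Nat :=
  (List.range ts.length).countP (fun j => !gbx gs ts j && (ts.getD j ' ' == c))

-- rank of position i among non-green guess occurrences of c
def rnk (gs ts : List Char) (i : Nat) (c : Char) : Nat :=
  (List.range i).countP (fun k => !gbx gs ts k && (gs.getD k ' ' == c))

-- the per-position value both programs compute
def finalR (gs ts : List Char) (j : Nat) : String :=
  if gbx gs ts j = true then "green"
  else if j < gs.length ∧ rnk gs ts j (gs.getD j ' ') < cntA gs ts (gs.getD j ' ') then "yellow"
  else "grey"

-- general counting fact: a countP split by a second Boolean test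
theorem countP_split {α : Type} (l : List α) (a b : α → Bool) :
    l.countP (fun x => !a x && b x) + l.countP (fun x => a x && b x) = l.countP b := by
  induction l with
  | nil => rfl
  | cons x xs ih =>
    simp only [List.countP_cons]
    cases ha : a x <;> cases hb : b x <;> simp [ha, hb] <;> omega

theorem count_eq_countP_range {α : Type} [BEq α] [LawfulBEq α] (l : List α) (d c : α) :
    l.count c = (List.range l.length).countP (fun j => l.getD j d == c) := by
  induction l with
  | nil => rfl
  | cons x xs ih =>
    rw [List.count_cons, List.length_cons, List.range_succ_eq_map, List.countP_cons,
      List.countP_map]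
    simp only [List.getD_cons_zero, List.getD_cons_succ, Function.comp_def]
    rw [ih]

theorem countP_range_guard (m n : Nat) (hmn : m ≤ n) (r : Nat → Bool) :
    (List.range n).countP (fun j => decide (j < m) && r j) = (List.range m).countP r := by
  obtain ⟨k, rfl⟩ := Nat.exists_eq_add_of_le hmn
  rw [List.range_add, List.countP_append, List.countP_map]
  have h2 : (List.range k).countP ((fun j => decide (j < m) && r j) ∘ (m + ·)) = 0 := by
    apply List.countP_eq_zero.mpr
    intro x _
    simp [Function.comp, Nat.not_lt.mpr (Nat.le_add_right m x)]
  rw [h2, Nat.add_zero]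
  apply List.countP_congr
  intro x hx
  simp [List.mem_range.mp hx]

-- cntA as "total count minus green matches", the shape pass 1 of A produces
theorem cntA_eq (gs ts : List Char) (hm : gs.length ≤ ts.length) (c : Char) :
    (cntA gs ts c : Int) = (ts.count c : Int) -
      ((List.range gs.length).countP
        (fun j => (gs.getD j ' ' == ts.getD j ' ') && (ts.getD j ' ' == c)) : Int) := by
  have hsplit := countP_split (List.range ts.length) (gbx gs ts) (fun j => ts.getD j ' ' == c)
  have hguard : (List.range ts.length).countP (fun j => gbx gs ts j && (ts.getD j ' ' == c)) =
      (List.range gs.length).countP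
        (fun j => (gs.getD j ' ' == ts.getD j ' ') && (ts.getD j ' ' == c)) := by
    rw [← countP_range_guard gs.length ts.length hm
      (fun j => (gs.getD j ' ' == ts.getD j ' ') && (ts.getD j ' ' == c))]
    apply List.countP_congr
    intro x _
    simp only [gbx, Bool.and_assoc]
  have hcount : (List.range ts.length).countP (fun j => ts.getD j ' ' == c) = ts.count c :=
    (count_eq_countP_range ts ' ' c).symm
  rw [hguard, hcount] at hsplit
  unfold cntA
  omega

-- a positive cntA means c really occurs in ts
theorem cntA_pos_mem (gs ts : List Char) (c : Char) (h : 0 < cntA gs ts c) : c ∈ ts := by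
  obtain ⟨j, hj, hp⟩ := List.countP_pos_iff.mp h
  have hjn : j < ts.length := List.mem_range.mp hj
  have hc : ts.getD j ' ' = c := by
    have := (Bool.and_eq_true _ _).mp hp
    exact beq_iff_eq.mp this.2
  rw [← hc, List.getD_eq_getElem _ _ hjn]
  exact List.getElem_mem hjn

-- ===== pass 1 of A =====
theorem pass1_spec (gs ts : List Char) (hm : gs.length ≤ ts.length) (i : Nat) (hi : i ≤ gs.length) :
    ((PySem.List.pyRange 0 (i : Int) 1).foldl (stepA1 gs ts)
        (List.replicate ts.length "grey", PySem.Dict.counter ts)).1.length = ts.length ∧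
    (∀ j : Nat, j < ts.length →
      ((PySem.List.pyRange 0 (i : Int) 1).foldl (stepA1 gs ts)
          (List.replicate ts.length "grey", PySem.Dict.counter ts)).1.getD j "" =
        if j < i ∧ (gs.getD j ' ' == ts.getD j ' ') = true then "green" else "grey") ∧
    (∀ c : Char,
      ((PySem.List.pyRange 0 (i : Int) 1).foldl (stepA1 gs ts)
          (List.replicate ts.length "grey", PySem.Dict.counter ts)).2.getD c 0 =
        (ts.count c : Int) -
          ((List.range i).countP
            (fun j => (gs.getD j ' ' == ts.getD j ' ') && (ts.getD j ' ' == c)) : Int)) ∧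
    (∀ c : Char,
      ((PySem.List.pyRange 0 (i : Int) 1).foldl (stepA1 gs ts)
          (List.replicate ts.length "grey", PySem.Dict.counter ts)).2.contains c = ts.contains c) := by
  induction i with
  | zero =>
    refine ⟨by simp [PySem.List.pyRange_zero], ?_, ?_, ?_⟩
    · intro j hj
      simp [List.getD_eq_getElem?_getD, List.getElem?_replicate, hj]
    · intro c
      simp [PySem.List.pyRange_zero, PySem.Dict.getD_counter]
    · intro c
      simp [PySem.List.pyRange_zero, PySem.Dict.contains_counter]
  | succ i ih =>
    have hi' : i ≤ gs.length := Nat.le_of_succ_le hi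
    have him : i < gs.length := hi
    have hin : i < ts.length := lt_of_lt_of_le him hm
    obtain ⟨h1, h2, h3, h4⟩ := ih hi'
    have hcast : ((i + 1 : Nat) : Int) = (i : Int) + 1 := by push_cast; ring
    rw [hcast, PySem.List.pyRange_one_succ_right (by positivity), List.foldl_append]
    set r := (PySem.List.pyRange 0 (i : Int) 1).foldl (stepA1 gs ts)
        (List.replicate ts.length "grey", PySem.Dict.counter ts) with hr
    have hgc : PySem.List.pyGetD gs (i : Int) ' ' = gs.getD i ' ' := PySem.List.pyGetD_natCast ..
    have htc : PySem.List.pyGetD ts (i : Int) ' ' = ts.getD i ' ' := PySem.List.pyGetD_natCast ..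
    simp only [List.foldl_cons, List.foldl_nil, stepA1, hgc, htc, Int.toNat_natCast]
    by_cases hg : gs.getD i ' ' = ts.getD i ' '
    · have hgb : (gs.getD i ' ' == ts.getD i ' ') = true := beq_iff_eq.mpr hg
      simp only [hg, eq_self_iff_true, if_true]
      refine ⟨by simpa using h1, ?_, ?_, ?_⟩
      · intro j hj
        rw [List.getD_eq_getElem?_getD, List.getElem?_set]
        by_cases hji : i = j
        · subst hji
          rw [if_pos rfl, if_pos (h1 ▸ hin), if_pos ⟨Nat.lt_succ_self i, hgb⟩]
          rfl
        · rw [if_neg hji, ← List.getD_eq_getElem?_getD, h2 j hj]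
          have : (j < i + 1 ∧ (gs.getD j ' ' == ts.getD j ' ') = true) ↔
              (j < i ∧ (gs.getD j ' ' == ts.getD j ' ') = true) := by
            constructor
            · rintro ⟨h, hb⟩; exact ⟨by omega, hb⟩
            · rintro ⟨h, hb⟩; exact ⟨by omega, hb⟩
          simp only [this]
      · intro c
        simp only [PySem.Dict.getD_modify, h3, List.range_succ, List.countP_append,
          List.countP_singleton]
        by_cases hc : c = ts.getD i ' '
        · rw [if_pos hc]
          have hcond : ((gs.getD i ' ' == ts.getD i ' ') && (ts.getD i ' ' == c)) = true := by
            rw [hc, hgb, Bool.true_and, beq_self_eq_true]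
          rw [hcond, if_pos rfl]
          subst hc
          push_cast
          ring
        · rw [if_neg hc]
          have hcond : ((gs.getD i ' ' == ts.getD i ' ') && (ts.getD i ' ' == c)) = false := by
            have hf : (ts.getD i ' ' == c) = false := by
              rw [beq_eq_false_iff_ne]
              exact fun h => hc h.symm
            exact Bool.and_eq_false_iff.mpr (Or.inr hf)
          rw [hcond, if_neg (by simp)]
          push_cast
          ring
      · intro c
        rw [PySem.Dict.contains_modify, h4]
        by_cases hc : c = ts.getD i ' '
        · have hmem : c ∈ ts := by
            rw [hc, List.getD_eq_getElem _ _ hin]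
            exact List.getElem_mem hin
          simp [hmem]
        · rw [beq_eq_false_iff_ne.mpr hc, Bool.false_or]
    · have hgb : (gs.getD i ' ' == ts.getD i ' ') = false := beq_eq_false_iff_ne.mpr hg
      simp only [if_neg hg]
      refine ⟨h1, ?_, ?_, h4⟩
      · intro j hj
        rw [h2 j hj]
        have : (j < i + 1 ∧ (gs.getD j ' ' == ts.getD j ' ') = true) ↔
            (j < i ∧ (gs.getD j ' ' == ts.getD j ' ') = true) := by
          constructor
          · rintro ⟨h, hb⟩
            rcases Nat.lt_succ_iff_lt_or_eq.mp h with h' | h'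
            · exact ⟨h', hb⟩
            · subst h'; rw [hgb] at hb; cases hb
          · rintro ⟨h, hb⟩; exact ⟨by omega, hb⟩
        simp only [this]
      · intro c
        rw [h3 c, List.range_succ, List.countP_append, List.countP_singleton]
        have hcond : ((gs.getD i ' ' == ts.getD i ' ') && (ts.getD i ' ' == c)) = false := by
          rw [hgb, Bool.false_and]
        rw [hcond, if_neg (by simp)]
        push_cast
        ring

-- ===== pass 2 of A, characterised position by position =====
theorem pass2_spec (gs ts : List Char) (hm : gs.length ≤ ts.length)
    (s0 : List String × PySem.Dict Char Int)
    (h1 : s0.1.length = ts.length)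
    (h2 : ∀ j : Nat, j < ts.length →
      s0.1.getD j "" = if gbx gs ts j = true then "green" else "grey")
    (h3 : ∀ c : Char, s0.2.getD c 0 = (cntA gs ts c : Int))
    (h4 : ∀ c : Char, s0.2.contains c = ts.contains c)
    (k : Nat) (hk : k ≤ gs.length) :
    ((PySem.List.pyRange 0 (k : Int) 1).foldl (stepA2 gs) s0).1.length = ts.length ∧
    (∀ j : Nat, j < ts.length →
      ((PySem.List.pyRange 0 (k : Int) 1).foldl (stepA2 gs) s0).1.getD j "" =
        if j < k then finalR gs ts j
        else if gbx gs ts j = true then "green" else "grey") ∧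
    (∀ c : Char,
      ((PySem.List.pyRange 0 (k : Int) 1).foldl (stepA2 gs) s0).2.getD c 0 =
        (cntA gs ts c : Int) - min ((rnk gs ts k c : Int)) ((cntA gs ts c : Int))) ∧
    (∀ c : Char,
      ((PySem.List.pyRange 0 (k : Int) 1).foldl (stepA2 gs) s0).2.contains c = ts.contains c) := by
  induction k with
  | zero =>
    refine ⟨h1, ?_, ?_, ?_⟩
    · intro j hj
      simp only [PySem.List.pyRange_zero, Nat.cast_zero, Int.toNat_zero, List.range_zero,
        List.map_nil, List.foldl_nil]
      rw [h2 j hj]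
      simp [Nat.not_lt_zero]
    · intro c
      simp only [PySem.List.pyRange_zero, Nat.cast_zero, Int.toNat_zero, List.range_zero,
        List.map_nil, List.foldl_nil]
      rw [h3 c]
      simp [rnk]
    · intro c
      simp only [PySem.List.pyRange_zero, Nat.cast_zero, Int.toNat_zero, List.range_zero,
        List.map_nil, List.foldl_nil]
      exact h4 c
  | succ k ih =>
    have hk' : k ≤ gs.length := Nat.le_of_succ_le hk
    have hkm : k < gs.length := hk
    have hkn : k < ts.length := lt_of_lt_of_le hkm hm
    obtain ⟨g1, g2, g3, g4⟩ := ih hk'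
    have hcast : ((k + 1 : Nat) : Int) = (k : Int) + 1 := by push_cast; ring
    rw [hcast, PySem.List.pyRange_one_succ_right (by positivity), List.foldl_append]
    set s := (PySem.List.pyRange 0 (k : Int) 1).foldl (stepA2 gs) s0 with hs
    have hGetRes : PySem.List.pyGetD s.1 (k : Int) "" = s.1.getD k "" := PySem.List.pyGetD_natCast ..
    have hGetGs : PySem.List.pyGetD gs (k : Int) ' ' = gs.getD k ' ' := PySem.List.pyGetD_natCast ..
    have hresk : s.1.getD k "" = if gbx gs ts k = true then "green" else "grey" := by
      rw [g2 k hkn, if_neg (by omega)]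
    have hkr : k < s.1.length := by omega
    simp only [List.foldl_cons, List.foldl_nil, stepA2, hGetRes, hGetGs, Int.toNat_natCast]
    set gc := gs.getD k ' ' with hgc
    -- rnk at k+1 in terms of rnk at k
    have hrnk_succ : ∀ c : Char, rnk gs ts (k + 1) c =
        rnk gs ts k c + (if (!gbx gs ts k && (gc == c)) = true then 1 else 0) := by
      intro c
      unfold rnk
      rw [List.range_succ, List.countP_append, List.countP_singleton, ← hgc]
    by_cases hgb : gbx gs ts k = true
    · -- green position: A skips, nothing changes
      rw [hresk, if_pos hgb, if_pos rfl]
      refine ⟨g1, ?_, ?_, g4⟩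
      · intro j hj
        rw [g2 j hj]
        by_cases hjk : j < k
        · rw [if_pos hjk, if_pos (show j < k + 1 by omega)]
        · by_cases hje : j = k
          · subst hje
            rw [if_neg (show ¬ j < j by omega), if_pos (show j < j + 1 by omega)]
            unfold finalR
            rw [if_pos hgb, if_pos hgb]
          · rw [if_neg hjk, if_neg (show ¬ j < k + 1 by omega)]
      · intro c
        rw [g3 c, hrnk_succ c, hgb]
        simp
    · -- non-green position
      have hresk' : s.1.getD k "" = "grey" := by rw [hresk, if_neg hgb]
      have hnotgreen : ¬ s.1.getD k "" = "green" := by rw [hresk']; decide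
      rw [if_neg hnotgreen]
      have hrnk_inc : rnk gs ts (k + 1) gc = rnk gs ts k gc + 1 := by
        rw [hrnk_succ gc]
        simp [hgb]
      have hrnk_same : ∀ c : Char, c ≠ gc → rnk gs ts (k + 1) c = rnk gs ts k c := by
        intro c hne
        rw [hrnk_succ c]
        simp [beq_eq_false_iff_ne.mpr (fun h => hne h.symm)]
      by_cases hyel : rnk gs ts k gc < cntA gs ts gc
      · -- yellow: the counter is still positive there
        have hpos : 0 < s.2.getD gc 0 := by
          rw [g3 gc]
          have : (rnk gs ts k gc : Int) < (cntA gs ts gc : Int) := by exact_mod_cast hyel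
          omega
        have hmem : gc ∈ ts := cntA_pos_mem gs ts gc (by omega)
        have hcont : s.2.contains gc = true := by
          rw [g4 gc]
          simp [hmem]
        rw [if_pos ⟨hcont, hpos⟩]
        refine ⟨by simpa using g1, ?_, ?_, ?_⟩
        · intro j hj
          rw [List.getD_eq_getElem?_getD, List.getElem?_set]
          by_cases hje : k = j
          · subst hje
            rw [if_pos rfl, if_pos hkr]
            simp only [Option.getD_some]
            rw [if_pos (show k < k + 1 by omega)]
            unfold finalR
            rw [if_neg (by simp [hgb]), if_pos ⟨hkm, hyel⟩]
          · rw [if_neg hje, ← List.getD_eq_getElem?_getD, g2 j hj]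
            by_cases hjk : j < k
            · rw [if_pos hjk, if_pos (show j < k + 1 by omega)]
            · rw [if_neg hjk, if_neg (show ¬ j < k + 1 by omega)]
        · intro c
          rw [PySem.Dict.getD_modify]
          by_cases hce : c = gc
          · rw [if_pos hce, hce, g3 gc, hrnk_inc]
            have h1' : (rnk gs ts k gc : Int) < (cntA gs ts gc : Int) := by
              exact_mod_cast hyel
            push_cast
            omega
          · rw [if_neg hce, g3 c, hrnk_same c hce]
        · intro c
          rw [PySem.Dict.contains_modify, g4 c]
          by_cases hce : c = gc
          · have hct : ts.contains c = true := by
              rw [hce]; simpa using hmem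
            rw [hct, Bool.or_true]
          · rw [beq_eq_false_iff_ne.mpr hce, Bool.false_or]
      · -- grey: the counter is exhausted there
        have hzero : s.2.getD gc 0 = 0 := by
          rw [g3 gc]
          have : (cntA gs ts gc : Int) ≤ (rnk gs ts k gc : Int) := by
            exact_mod_cast Nat.le_of_not_lt hyel
          omega
        have hnocond : ¬ (s.2.contains gc = true ∧ 0 < s.2.getD gc 0) := by
          rintro ⟨_, hgt⟩
          omega
        rw [if_neg hnocond]
        refine ⟨g1, ?_, ?_, g4⟩
        · intro j hj
          rw [g2 j hj]
          by_cases hjk : j < k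
          · rw [if_pos hjk, if_pos (show j < k + 1 by omega)]
          · by_cases hje : j = k
            · subst hje
              rw [if_neg (show ¬ j < j by omega), if_pos (show j < j + 1 by omega), if_neg hgb]
              unfold finalR
              rw [if_neg (by simp [hgb]), if_neg (by rintro ⟨_, h⟩; exact hyel h)]
            · rw [if_neg hjk, if_neg (show ¬ j < k + 1 by omega)]
        · intro c
          rw [g3 c]
          by_cases hce : c = gc
          · rw [hce, hrnk_inc]
            have : (cntA gs ts gc : Int) ≤ (rnk gs ts k gc : Int) := by
              exact_mod_cast Nat.le_of_not_lt hyel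
            push_cast
            omega
          · rw [hrnk_same c hce]

-- ===== B computes the same per-position value =====
theorem stepB_body (gs ts : List Char) (green : List Bool) (acc : List String) (i : Int) :
    stepB gs ts green acc i = acc ++
      [if PySem.List.pyGetD green i false = true then "green"
       else if decide (i < (gs.length : Int)) &&
          decide (rankB gs green i (PySem.List.pyGetD gs i ' ') <
            availB ts green (PySem.List.pyGetD gs i ' ')) then "yellow"
       else "grey"] := by
  unfold stepB
  split_ifs <;> rfl

theorem greenB_getD (gs ts : List Char) (j : Nat) (hj : j < ts.length) :
    PySem.List.pyGetD (greenB gs ts) (j : Int) false = gbx gs ts j := by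
  unfold greenB
  rw [PySem.List.pyGetD_map_pyRange _ ts.length j false hj]
  unfold gbx
  rw [PySem.List.pyGetD_natCast, PySem.List.pyGetD_natCast]
  congr 1
  simp

theorem availB_eq (gs ts : List Char) (c : Char) :
    availB ts (greenB gs ts) c = (cntA gs ts c : Int) := by
  unfold availB cntA
  rw [PySem.List.pyRange_zero, Int.toNat_natCast, List.map_map]
  rw [show ((fun j => if (!PySem.List.pyGetD (greenB gs ts) j false &&
      (PySem.List.pyGetD ts j ' ' == c)) = true then (1 : Int) else 0) ∘ (fun k : Nat => (k : Int)))
      = (fun k : Nat => if (!PySem.List.pyGetD (greenB gs ts) (k : Int) false &&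
        (PySem.List.pyGetD ts (k : Int) ' ' == c)) = true then (1 : Int) else 0) from rfl]
  have hcongr : (List.range ts.length).map
      (fun k : Nat => if (!PySem.List.pyGetD (greenB gs ts) (k : Int) false &&
        (PySem.List.pyGetD ts (k : Int) ' ' == c)) = true then (1 : Int) else 0) =
      (List.range ts.length).map
        (fun k : Nat => if (!gbx gs ts k && (ts.getD k ' ' == c)) = true then (1 : Int) else 0) := by
    apply List.map_congr_left
    intro k hk
    rw [greenB_getD gs ts k (List.mem_range.mp hk), PySem.List.pyGetD_natCast]
  rw [hcongr, PySem.List.sum_map_ite_one_zero]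

theorem rankB_eq (gs ts : List Char) (i : Nat) (hi : i ≤ ts.length) (c : Char) :
    rankB gs (greenB gs ts) (i : Int) c = (rnk gs ts i c : Int) := by
  unfold rankB rnk
  rw [PySem.List.pyRange_zero, Int.toNat_natCast, List.map_map]
  rw [show ((fun k => if (!PySem.List.pyGetD (greenB gs ts) k false &&
      (PySem.List.pyGetD gs k ' ' == c)) = true then (1 : Int) else 0) ∘ (fun k : Nat => (k : Int)))
      = (fun k : Nat => if (!PySem.List.pyGetD (greenB gs ts) (k : Int) false &&
        (PySem.List.pyGetD gs (k : Int) ' ' == c)) = true then (1 : Int) else 0) from rfl]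
  have hcongr : (List.range i).map
      (fun k : Nat => if (!PySem.List.pyGetD (greenB gs ts) (k : Int) false &&
        (PySem.List.pyGetD gs (k : Int) ' ' == c)) = true then (1 : Int) else 0) =
      (List.range i).map
        (fun k : Nat => if (!gbx gs ts k && (gs.getD k ' ' == c)) = true then (1 : Int) else 0) := by
    apply List.map_congr_left
    intro k hk
    have hkn : k < ts.length := lt_of_lt_of_le (List.mem_range.mp hk) hi
    rw [greenB_getD gs ts k hkn, PySem.List.pyGetD_natCast]
  rw [hcongr, PySem.List.sum_map_ite_one_zero]

theorem alt_eq_map (g t : String) :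
    get_color_hints_alt g t = (List.range t.toList.length).map (finalR g.toList t.toList) := by
  set gs := g.toList
  set ts := t.toList
  show (PySem.List.pyRange 0 (ts.length : Int) 1).foldl (stepB gs ts (greenB gs ts)) [] =
    (List.range ts.length).map (finalR gs ts)
  have hfold : (PySem.List.pyRange 0 (ts.length : Int) 1).foldl (stepB gs ts (greenB gs ts)) [] =
      [] ++ (PySem.List.pyRange 0 (ts.length : Int) 1).map
        (fun i => if PySem.List.pyGetD (greenB gs ts) i false = true then "green"
          else if decide (i < (gs.length : Int)) &&
              decide (rankB gs (greenB gs ts) i (PySem.List.pyGetD gs i ' ') <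
                availB ts (greenB gs ts) (PySem.List.pyGetD gs i ' ')) then "yellow"
          else "grey") := by
    rw [← PySem.List.foldl_append_singleton_eq_map]
    apply PySem.List.foldl_congr_mem
    intro acc i _
    exact stepB_body gs ts (greenB gs ts) acc i
  rw [hfold, List.nil_append, PySem.List.pyRange_zero, Int.toNat_natCast, List.map_map]
  apply List.map_congr_left
  intro j hj
  have hjn : j < ts.length := List.mem_range.mp hj
  simp only [Function.comp_apply]
  rw [greenB_getD gs ts j hjn, PySem.List.pyGetD_natCast,
    rankB_eq gs ts j (le_of_lt hjn) (gs.getD j ' '), availB_eq gs ts (gs.getD j ' ')]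
  unfold finalR
  by_cases hgb : gbx gs ts j = true
  · rw [if_pos hgb, if_pos hgb]
  · rw [if_neg hgb, if_neg hgb]
    have hcast : (decide ((j : Int) < (gs.length : Int)) &&
        decide ((rnk gs ts j (gs.getD j ' ') : Int) < (cntA gs ts (gs.getD j ' ') : Int)))
        = decide (j < gs.length ∧ rnk gs ts j (gs.getD j ' ') < cntA gs ts (gs.getD j ' ')) := by
      by_cases h1' : j < gs.length <;>
        by_cases h2' : rnk gs ts j (gs.getD j ' ') < cntA gs ts (gs.getD j ' ') <;>
          simp [h1', h2', Int.ofNat_lt]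
    rw [hcast]
    by_cases hcond : j < gs.length ∧ rnk gs ts j (gs.getD j ' ') < cntA gs ts (gs.getD j ' ')
    · simp [hcond]
    · simp [hcond]

-- ===== VERDICT (by name: the statement is the Claim_ definition above) =====
theorem get_color_hints_spec : Claim_equal_get_color_hints := by
  intro g t _ hpre
  unfold Spec_get_color_hints
  have hm : g.toList.length ≤ t.toList.length := hpre
  obtain ⟨h1, h2, h3, h4⟩ := pass1_spec g.toList t.toList hm g.toList.length le_rfl
  set s0 := (PySem.List.pyRange 0 (g.toList.length : Int) 1).foldl (stepA1 g.toList t.toList)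
      (List.replicate t.toList.length "grey", PySem.Dict.counter t.toList) with hs0
  have hA : get_color_hints g t =
      ((PySem.List.pyRange 0 (g.toList.length : Int) 1).foldl (stepA2 g.toList) s0).1 := rfl
  obtain ⟨f1, f2, f3, f4⟩ := pass2_spec g.toList t.toList hm s0 h1
    (by
      intro j hj
      rw [h2 j hj]
      unfold gbx
      by_cases hjm : j < g.toList.length <;>
        by_cases hb : (g.toList.getD j ' ' == t.toList.getD j ' ') = true <;>
          simp [hjm, hb])
    (by
      intro c
      rw [h3 c, cntA_eq g.toList t.toList hm c])
    h4 g.toList.length le_rfl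
  rw [hA, alt_eq_map g t]
  apply List.ext_getElem
  · rw [f1, List.length_map, List.length_range]
  · intro j hj1 hj2
    have hjn : j < t.toList.length := by
      rw [f1] at hj1
      exact hj1
    rw [← List.getD_eq_getElem _ "" hj1, f2 j hjn]
    rw [List.getElem_map, List.getElem_range]
    by_cases hjm : j < g.toList.length
    · rw [if_pos hjm]
    · rw [if_neg hjm]
      have hgbf : gbx g.toList t.toList j = false := by
        unfold gbx
        exact Bool.and_eq_false_iff.mpr (Or.inl (decide_eq_false hjm))
      rw [if_neg (by simp [hgbf])]
      unfold finalR
      rw [if_neg (by simp [hgbf]), if_neg (by rintro ⟨h, _⟩; exact hjm h)]
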